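-- pv_equiv track=rewrite | github.com/loning/the-binarymath | docs/proof/test_L1_4_time_emergence.py | simulate_state_evolution
-- ===== SOURCE A (Python) =====
-- from typing import Set, Dict, List, Optional, Tuple
--
-- def simulate_state_evolution(initial_state: Set[str], steps: int) -> List[Set[str]]:
--     """Simulate evolution of self-referential system"""
--     evolution = [initial_state]
--     current = initial_state.copy()
--
--     for i in range(steps):
--         # Simple evolution: add new states based on existing ones
--         new_elements = set()
--         for state in current:
--             # Add a transformation of each state
--             new_state = state + '0' if len(state) < 5 else state[:-1] + '1'
--             new_elements.add(new_state)
--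
--         # Create new state set
--         next_state = current | new_elements
--         evolution.append(next_state)
--         current = next_state
--
--     return evolution
-- ===== SOURCE B (Python) =====
-- def _step(current):
--     return current | {s + '0' if len(s) < 5 else s[:-1] + '1' for s in current}
--
--
-- def simulate_state_evolution(initial_state, steps):
--     """Cycle detection: the step map is deterministic, so once a state recurs
--     the whole future is periodic; remember every state seen in a hash index
--     and, at the first recurrence, replay the detected cycle instead of
--     recomputing the remaining unions."""
--     evolution = [initial_state]
--     current = initial_state.copy()
--     seen = {tuple(current): 0}
--     for i in range(steps):
--         current = _step(current)
--         evolution.append(current)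
--         j = seen.get(tuple(current))
--         if j is not None:
--             cycle = evolution[j:i + 1]
--             for k in range(steps - i - 1):
--                 evolution.append(cycle[(k + 1) % len(cycle)])
--             break
--         seen[tuple(current)] = i + 1
--     return evolution
-- ===== Notes on version B (the rewrite author's own statement) =====
-- stated objective: alternative
-- what changed: B records every state seen in a hash index and, at the first recurrence of a state, replays the detected cycle for the remaining steps instead of recomputing a union per step (the step map is deterministic, so the future is periodic from a recurrence on).
import Mathlib
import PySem

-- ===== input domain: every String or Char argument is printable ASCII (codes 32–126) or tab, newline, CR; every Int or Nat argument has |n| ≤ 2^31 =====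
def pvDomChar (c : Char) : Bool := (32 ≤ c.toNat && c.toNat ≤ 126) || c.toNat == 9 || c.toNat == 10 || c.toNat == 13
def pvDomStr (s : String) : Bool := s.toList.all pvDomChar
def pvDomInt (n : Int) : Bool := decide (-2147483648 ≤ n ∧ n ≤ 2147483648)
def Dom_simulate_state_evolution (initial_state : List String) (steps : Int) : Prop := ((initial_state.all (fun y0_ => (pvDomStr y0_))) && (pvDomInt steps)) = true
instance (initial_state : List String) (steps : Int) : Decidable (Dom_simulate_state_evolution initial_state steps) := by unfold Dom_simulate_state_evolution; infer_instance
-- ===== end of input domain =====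

-- B records every state seen in a hash index and, at the first recurrence of a state, replays the
-- detected cycle for the remaining steps instead of recomputing a union per step ('alternative' objective).

-- the shared per-element transformation: state + '0' if len(state) < 5 else state[:-1] + '1'
def pv_transform (state : String) : String :=
  if PySem.Str.len state < 5 then state ++ "0" else PySem.Str.slice state none (some (-1)) ++ "1"

-- ===== PORT A =====
def simulate_state_evolution (initial_state : List String) (steps : Int) : List (List String) :=
  ((PySem.List.pyRange 0 steps).foldl
    (fun (st : List (List String) × List String) (_ : Int) =>
      -- new_elements = set(); for state in current: new_elements.add(transform(state))
      let new_elements : PySem.Set String :=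
        st.2.foldl (fun ne state => PySem.Set.add ne (pv_transform state)) PySem.Set.empty
      -- next_state = current | new_elements; evolution.append(next_state)
      let next_state : PySem.Set String := PySem.Set.union st.2 new_elements
      (st.1 ++ [next_state], next_state))
    ([initial_state], initial_state)).1

-- ===== PORT B =====
-- _step(current) = current | {s + '0' if len(s) < 5 else s[:-1] + '1' for s in current}
def pv_step (current : List String) : List String :=
  PySem.Set.union current (PySem.Set.ofList (current.map pv_transform))

-- the 'for i in range(steps)' loop of Source B with its seen-index lookup, cycle replay and 'break'
def pvAltLoop (steps : Int) : List Int → List (List String) → List String →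
    PySem.Dict (List String) Int → List (List String)
  | [], evolution, _, _ => evolution
  | i :: rest, evolution, current, seen =>
      let current' := pv_step current
      let evolution' := evolution ++ [current']
      -- j = seen.get(tuple(current)); if j is not None: replay the cycle and break, else record and go on
      (PySem.Dict.get? seen current').elim
        (pvAltLoop steps rest evolution' current' (PySem.Dict.insert seen current' (i + 1)))
        (fun j =>
          -- cycle = evolution[j:i + 1]; then append cycle[(k + 1) % len(cycle)] for each k
          let cycle := PySem.List.slice evolution' (some j) (some (i + 1))
          (PySem.List.pyRange 0 (steps - i - 1)).foldl
            (fun ev k =>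
              ev ++ [PySem.List.pyGetD cycle (PySem.Int.mod (k + 1) (cycle.length : Int)) []])
            evolution')

def simulate_state_evolution_alt (initial_state : List String) (steps : Int) : List (List String) :=
  -- evolution = [initial_state]; current = initial_state.copy(); seen = {tuple(current): 0}
  pvAltLoop steps (PySem.List.pyRange 0 steps) [initial_state] initial_state
    (PySem.Dict.insert PySem.Dict.empty initial_state 0)

-- ===== PRECONDITION & SPEC =====
def Spec_simulate_state_evolution (initial_state : List String) (steps : Int) (out : List (List String)) : Prop := out = simulate_state_evolution_alt initial_state steps
instance (initial_state : List String) (steps : Int) (out : List (List String)) : Decidable (Spec_simulate_state_evolution initial_state steps out) := by unfold Spec_simulate_state_evolution; infer_instance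

-- ===== CLAIM (what is proved, stated in full; the proofs are below) =====
def Claim_equal_simulate_state_evolution : Prop := ∀ (initial_state : List String) (steps : Int), Dom_simulate_state_evolution initial_state steps → Spec_simulate_state_evolution initial_state steps (simulate_state_evolution initial_state steps)

-- ===== LEMMAS AND PROOFS =====

-- A's loop body, written with pv_step
def pvStepA (st : List (List String) × List String) (_ : Int) : List (List String) × List String :=
  (st.1 ++ [pv_step st.2], pv_step st.2)

-- the m-th state of the evolution, and the evolution list up to index n
def pvIter (x0 : List String) (m : Nat) : List String := pv_step^[m] x0
def pvEvo (x0 : List String) (n : Nat) : List (List String) := (List.range (n + 1)).map (pvIter x0)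

-- A's inner accumulation loop builds exactly set(map(transform, current)), so A's step is pv_step
lemma pv_A_next (cur : List String) :
    PySem.Set.union cur
      (cur.foldl (fun ne state => PySem.Set.add ne (pv_transform state)) PySem.Set.empty)
    = pv_step cur := by
  rw [← PySem.Set.update_map_eq_foldl_add, PySem.Set.update_empty]
  rfl

-- each step only appends
lemma pv_step_grow (cur : List String) : ∃ d, pv_step cur = cur ++ d :=
  ⟨_, PySem.Set.update_eq_append_filter cur (PySem.Set.ofList (cur.map pv_transform))⟩

lemma pv_iter_len_mono (c : List String) : ∀ (p : Nat), c.length ≤ (pv_step^[p] c).length := by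
  intro p
  induction p with
  | zero => simp
  | succ q ih =>
    rw [Function.iterate_succ_apply']
    obtain ⟨d, hd⟩ := pv_step_grow (pv_step^[q] c)
    rw [hd, List.length_append]
    omega

-- a state that recurs is already a fixed point
lemma pv_fix_of_iterate (c : List String) (p : Nat) (hp : 0 < p)
    (h : pv_step^[p] c = c) : pv_step c = c := by
  obtain ⟨d, hd⟩ := pv_step_grow c
  have h1 : (pv_step c).length ≤ (pv_step^[p] c).length := by
    obtain ⟨q, rfl⟩ := Nat.exists_eq_add_of_le hp
    rw [Nat.add_comm, Function.iterate_add_apply]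
    exact pv_iter_len_mono (pv_step^[1] c) q
  rw [h] at h1
  have : d = [] := by
    rw [hd, List.length_append] at h1
    have := List.length_eq_zero_iff.2 (rfl : ([] : List String) = [])
    cases d with
    | nil => rfl
    | cons a t => simp at h1
  rw [hd, this, List.append_nil]

lemma pv_iter_const (c : List String) (h : pv_step c = c) : ∀ m, pv_step^[m] c = c := by
  intro m
  induction m with
  | zero => rfl
  | succ q ih => rw [Function.iterate_succ_apply', ih, h]

-- A's loop on a fixed point only repeats it
lemma pv_const_fold (c : List String) (h : pv_step c = c) :
    ∀ (l : List Int) (ev : List (List String)),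
      (l.foldl pvStepA (ev, c)).1 = ev ++ List.replicate l.length c := by
  intro l
  induction l with
  | nil => intro ev; simp
  | cons x t ih =>
    intro ev
    simp only [List.foldl_cons, pvStepA, h]
    rw [ih (ev ++ [c])]
    simp [List.replicate_succ]

-- pyRange is empty iff the interval is
lemma pv_pyRange_nil (a b : Int) (h : b ≤ a) : PySem.List.pyRange a b = [] := by
  rw [PySem.List.pyRange]; simp; omega

lemma pv_pyRange_len : ∀ (fuel : Nat) (a b : Int), fuel = (b - a).toNat →
    (PySem.List.pyRange a b).length = fuel := by
  intro fuel
  induction fuel with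
  | zero => intro a b h; rw [pv_pyRange_nil a b (by omega)]; rfl
  | succ f ih =>
    intro a b h
    rw [PySem.List.pyRange_one_cons (by omega), List.length_cons, ih (a + 1) b (by omega)]

-- the evolution prefix really is the iterate list
lemma pv_evo_succ (x0 : List String) (n : Nat) :
    pvEvo x0 (n + 1) = pvEvo x0 n ++ [pvIter x0 (n + 1)] := by
  rw [pvEvo, pvEvo, List.range_succ, List.map_append]; rfl

-- main induction: A's remaining fold equals B's loop, given the seen-index invariant
lemma pv_main (x0 : List String) : ∀ (fuel : Nat) (steps n : Int)
    (seen : PySem.Dict (List String) Int), 0 ≤ n → fuel = (steps - n).toNat →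
    (∀ t j, PySem.Dict.get? seen t = some j → 0 ≤ j ∧ j ≤ n ∧ t = pvIter x0 j.toNat) →
    ((PySem.List.pyRange n steps).foldl pvStepA (pvEvo x0 n.toNat, pvIter x0 n.toNat)).1
      = pvAltLoop steps (PySem.List.pyRange n steps) (pvEvo x0 n.toNat) (pvIter x0 n.toNat) seen := by
  intro fuel
  induction fuel with
  | zero =>
    intro steps n seen hn hf _
    rw [pv_pyRange_nil n steps (by omega)]
    rfl
  | succ f ih =>
    intro steps n seen hn hf hseen
    have hlt : n < steps := by omega
    rw [PySem.List.pyRange_one_cons hlt]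
    have hx : pv_step (pvIter x0 n.toNat) = pvIter x0 (n.toNat + 1) := by
      rw [pvIter, pvIter, Function.iterate_succ_apply']
    have hev : pvEvo x0 n.toNat ++ [pvIter x0 (n.toNat + 1)] = pvEvo x0 (n.toNat + 1) :=
      (pv_evo_succ x0 n.toNat).symm
    simp only [List.foldl_cons, pvAltLoop, pvStepA, hx, hev]
    cases hget : PySem.Dict.get? seen (pvIter x0 (n.toNat + 1)) with
    | none =>
      simp only [Option.elim_none]
      have hn1 : (n + 1).toNat = n.toNat + 1 := by omega
      have := ih steps (n + 1) (PySem.Dict.insert seen (pvIter x0 (n.toNat + 1)) (n + 1))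
        (by omega) (by omega) ?_
      · rw [hn1] at this
        exact this
      · intro t j hj
        rw [PySem.Dict.get?_insert] at hj
        by_cases ht : t = pvIter x0 (n.toNat + 1)
        · rw [if_pos ht] at hj
          have hjv : j = n + 1 := by injection hj with h'; omega
          exact ⟨by omega, by omega, by rw [hjv, hn1]; exact ht⟩
        · rw [if_neg ht] at hj
          obtain ⟨h1, h2, h3⟩ := hseen t j hj
          exact ⟨h1, by omega, h3⟩
    | some j =>
      simp only [Option.elim_some]
      obtain ⟨hj0, hjn, hjx⟩ := hseen _ _ hget
      -- the recurring state is a fixed point, and every state from index j on equals it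
      set c := pvIter x0 (n.toNat + 1) with hc
      set jn := j.toNat with hjn'
      have hjle : jn ≤ n.toNat := by omega
      have hrec : pv_step^[n.toNat + 1 - jn] (pvIter x0 jn) = pvIter x0 jn := by
        have h1 : pv_step^[n.toNat + 1 - jn] (pvIter x0 jn) = pvIter x0 (n.toNat + 1) := by
          rw [pvIter, pvIter, ← Function.iterate_add_apply]
          congr 1
          omega
        rw [h1, ← hc]
        exact hjx
      have hfix : pv_step (pvIter x0 jn) = pvIter x0 jn :=
        pv_fix_of_iterate _ _ (by omega) hrec
      have hall : ∀ m, jn ≤ m → pvIter x0 m = pvIter x0 jn := by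
        intro m hm
        have h1 : pvIter x0 m = pv_step^[m - jn] (pvIter x0 jn) := by
          rw [pvIter, pvIter, ← Function.iterate_add_apply]
          congr 1
          omega
        rw [h1, pv_iter_const _ hfix]
      have hcfix : pv_step c = c := by rw [hjx]; exact hfix
      -- the detected cycle is the fixed point repeated
      set p := n.toNat + 1 - jn with hp
      have hslice : PySem.List.slice (pvEvo x0 (n.toNat + 1)) (some j) (some (n + 1))
          = List.replicate p c := by
        have hj' : j = (jn : Int) := by omega
        have hn1 : n + 1 = (jn : Int) + (p : Int) := by omega
        rw [hj', hn1, PySem.List.slice_natCast_add]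
        apply List.ext_getElem
        · simp only [List.length_take, List.length_drop, List.length_replicate, pvEvo,
            List.length_map, List.length_range]
          omega
        · intro i h1 h2
          simp only [List.getElem_take, List.getElem_drop, List.getElem_replicate, pvEvo,
            List.getElem_map, List.getElem_range]
          exact (hall (jn + i) (by omega)).trans hjx.symm
      rw [hslice]
      -- every replayed entry is that fixed point
      have hrepl : (fun (ev : List (List String)) (k : Int) =>
            ev ++ [PySem.List.pyGetD (List.replicate p c) (PySem.Int.mod (k + 1)
              ((List.replicate p c).length : Int)) []])
          = fun ev _ => ev ++ [c] := by
        funext ev k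
        have hp0 : 0 < (p : Int) := by omega
        have hm : PySem.Int.mod (k + 1) ((List.replicate p c).length : Int)
            = (k + 1) % (p : Int) := by
          rw [List.length_replicate]
          simp [PySem.Int.mod, Int.fmod_eq_emod, hp0.le]
        have h0 : 0 ≤ (k + 1) % (p : Int) := Int.emod_nonneg _ (by omega)
        have h1 : (k + 1) % (p : Int) < (p : Int) := Int.emod_lt_of_pos _ hp0
        rw [hm, ← Int.toNat_of_nonneg h0, PySem.List.pyGetD_natCast, List.getD_eq_getElem]
        · rw [List.getElem_replicate]
        · rw [List.length_replicate]; omega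
      rw [hrepl, PySem.List.foldl_append_singleton_eq_map (fun _ => c)]
      -- A keeps appending the fixed point for the remaining steps
      rw [pv_const_fold c hcfix (PySem.List.pyRange (n + 1) steps) (pvEvo x0 (n.toNat + 1))]
      rw [List.map_const', pv_pyRange_len ((steps - n - 1).toNat) 0 (steps - n - 1) (by omega),
        pv_pyRange_len ((steps - n - 1).toNat) (n + 1) steps (by omega)]

-- ===== VERDICT (by name: the statement is the Claim_ definition above) =====
theorem simulate_state_evolution_spec : Claim_equal_simulate_state_evolution := by
  intro initial_state steps _
  unfold Spec_simulate_state_evolution simulate_state_evolution simulate_state_evolution_alt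
  have hstep : (fun (st : List (List String) × List String) (_ : Int) =>
      (st.1 ++ [PySem.Set.union st.2
          (st.2.foldl (fun ne state => PySem.Set.add ne (pv_transform state)) PySem.Set.empty)],
        PySem.Set.union st.2
          (st.2.foldl (fun ne state => PySem.Set.add ne (pv_transform state)) PySem.Set.empty)))
      = pvStepA := by
    funext st i
    simp only [pvStepA, pv_A_next]
  have h := pv_main initial_state ((steps - 0).toNat) steps 0
    (PySem.Dict.insert PySem.Dict.empty initial_state 0) le_rfl rfl ?_
  · have he : pvEvo initial_state (0 : Int).toNat = [initial_state] := by
      simp [pvEvo, pvIter]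
    have hi : pvIter initial_state (0 : Int).toNat = initial_state := rfl
    rw [he, hi] at h
    rw [hstep]
    exact h
  · intro t j hj
    rw [PySem.Dict.get?_insert] at hj
    by_cases ht : t = initial_state
    · rw [if_pos ht] at hj
      injection hj with h'
      exact ⟨by omega, by omega, by rw [ht, ← h']; rfl⟩
    · rw [if_neg ht] at hj
      simp [PySem.Dict.get?, PySem.Dict.empty] at hj
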